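-- pv_equiv track=rewrite | github.com/kmnhan/erlabpy | src/erlab/lattice.py | _pair_labels_form_cycle
-- ===== SOURCE A (Python) =====
-- def _pair_labels_form_cycle(pair_labels: set[tuple[int, int]]) -> bool:
--     """Return whether close owner-pair labels form a valid local BZ junction.
--
--     This helper is useful in :func:`_snap_polyline_endpoints`, where a cluster of close
--     contour endpoints should only be merged when its owner-pair graph matches a small
--     Voronoi-style cycle. That keeps exact ``hv`` overlays visually connected while
--     avoiding accidental merges of unrelated nearby vertices.
--
--     Parameters
--     ----------
--     pair_labels
--         Sorted owner-pair labels attached to candidate contour endpoints.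
--
--     Returns
--     -------
--     bool
--         `True` when every participating owner has degree two and the labels form a
--         simple cycle.
--     """
--     if len(pair_labels) < 3:
--         return False
--
--     degree: dict[int, int] = {}
--     for first, second in pair_labels:
--         degree[first] = degree.get(first, 0) + 1
--         degree[second] = degree.get(second, 0) + 1
--     return len(degree) == len(pair_labels) and all(val == 2 for val in degree.values())
-- ===== SOURCE B (Python) =====
-- def _pair_labels_form_cycle(pair_labels: set[tuple[int, int]]) -> bool:
--     if len(pair_labels) < 3:
--         return False
--     flat = sorted([x for pair in pair_labels for x in pair])
--     n = len(flat)
--     i = 0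
--     while i < n:
--         if i + 1 >= n or flat[i] != flat[i + 1]:
--             return False
--         if i + 2 < n and flat[i + 2] == flat[i]:
--             return False
--         i += 2
--     return True
-- ===== Notes on version B (the rewrite author's own statement) =====
-- stated objective: alternative
-- what changed: Replaces the maintained degree dictionary (and the redundant nodes==edges check) by flattening all endpoints, sorting them, and scanning once for runs of exactly two equal values.
import Mathlib
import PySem

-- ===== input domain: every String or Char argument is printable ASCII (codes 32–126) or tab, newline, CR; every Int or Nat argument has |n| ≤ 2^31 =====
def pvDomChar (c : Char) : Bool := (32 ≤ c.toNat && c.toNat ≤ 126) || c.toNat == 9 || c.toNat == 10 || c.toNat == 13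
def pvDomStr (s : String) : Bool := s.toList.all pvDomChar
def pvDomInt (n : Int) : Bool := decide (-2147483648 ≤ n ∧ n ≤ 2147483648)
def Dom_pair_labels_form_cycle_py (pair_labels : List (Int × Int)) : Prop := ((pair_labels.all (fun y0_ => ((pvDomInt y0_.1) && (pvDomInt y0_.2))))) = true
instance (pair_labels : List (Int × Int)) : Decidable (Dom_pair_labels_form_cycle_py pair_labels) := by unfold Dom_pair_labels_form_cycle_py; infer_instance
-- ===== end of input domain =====

-- B replaces A's maintained degree dictionary (plus its redundant nodes==edges check) by a
-- sort-then-scan over all flattened endpoints; alternative decomposition, similar cost.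

-- ===== PORT A =====
def pair_labels_form_cycle_py (pair_labels : List (Int × Int)) : Bool :=
  if pair_labels.length < 3 then false
  else
    let degree : PySem.Dict Int Int :=
      pair_labels.foldl (fun d p =>
        let d1 := d.insert p.1 (d.getD p.1 0 + 1)
        d1.insert p.2 (d1.getD p.2 0 + 1)) PySem.Dict.empty
    decide (degree.keys.length = pair_labels.length) && degree.values.all (fun v => decide (v = 2))

-- ===== PORT B =====
-- the while loop of Source B, stepping through the sorted flat list two at a time
def pvRuns2 : List Int → Bool
  | [] => true
  | [_] => false
  | [a, b] => a == b
  | a :: b :: c :: rest => a == b && c != a && pvRuns2 (c :: rest)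

def pair_labels_form_cycle_py_alt (pair_labels : List (Int × Int)) : Bool :=
  if pair_labels.length < 3 then false
  else
    pvRuns2 (PySem.List.sorted (pair_labels.flatMap (fun p => [p.1, p.2])) (fun x => x) false)

-- ===== PRECONDITION & SPEC =====
def Spec_pair_labels_form_cycle_py (pair_labels : List (Int × Int)) (out : Bool) : Prop := out = pair_labels_form_cycle_py_alt pair_labels
instance (pair_labels : List (Int × Int)) (out : Bool) : Decidable (Spec_pair_labels_form_cycle_py pair_labels out) := by unfold Spec_pair_labels_form_cycle_py; infer_instance

-- ===== CLAIM (what is proved, stated in full; the proofs are below) =====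
def Claim_equal_pair_labels_form_cycle_py : Prop := ∀ (pair_labels : List (Int × Int)), Dom_pair_labels_form_cycle_py pair_labels → Spec_pair_labels_form_cycle_py pair_labels (pair_labels_form_cycle_py pair_labels)

-- ===== LEMMAS AND PROOFS =====

-- A's two-increment loop over the pairs is the counter of the flattened endpoint list
theorem foldA_eq_counter (pair_labels : List (Int × Int)) :
    pair_labels.foldl (fun d p =>
        let d1 := d.insert p.1 (d.getD p.1 0 + 1)
        d1.insert p.2 (d1.getD p.2 0 + 1)) PySem.Dict.empty
      = PySem.Dict.counter (pair_labels.flatMap (fun p => [p.1, p.2])) := by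
  rw [← PySem.Dict.foldl_insert_getD_add_one_eq_counter]
  generalize (PySem.Dict.empty : PySem.Dict Int Int) = d
  induction pair_labels generalizing d with
  | nil => rfl
  | cons p t ih => simp [List.flatMap_cons, ih]

theorem length_flat (pair_labels : List (Int × Int)) :
    (pair_labels.flatMap (fun p => [p.1, p.2])).length = 2 * pair_labels.length := by
  induction pair_labels with
  | nil => rfl
  | cons p t ih => simp [List.flatMap_cons, ih]; omega

-- on a nondecreasing list, the two-at-a-time scan succeeds iff every member occurs exactly twice
theorem runs2_iff (l : List Int) (h : l.Pairwise (· ≤ ·)) :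
    pvRuns2 l = true ↔ ∀ x ∈ l, l.count x = 2 := by
  induction l using pvRuns2.induct with
  | case1 => simp [pvRuns2]
  | case2 a =>
      simp only [pvRuns2]
      constructor
      · intro h'; simp at h'
      · intro hall
        have := hall a (by simp)
        simp at this
  | case3 a b =>
      simp only [pvRuns2, beq_iff_eq]
      constructor
      · rintro rfl x hx
        rcases List.mem_cons.mp hx with rfl | hx'
        · simp
        · rcases List.mem_cons.mp hx' with rfl | h0
          · simp
          · cases h0
      · intro hall
        by_contra hne
        have := hall a (by simp)
        simp [Ne.symm hne] at this
  | case4 a b c rest ih =>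
      rcases List.pairwise_cons.mp h with ⟨hab, h2⟩
      rcases List.pairwise_cons.mp h2 with ⟨hbr, hr⟩
      have hab' : a ≤ b := hab b (by simp)
      have hac : a ≤ c := le_trans hab' (hbr c (by simp))
      have hcr : ∀ x ∈ c :: rest, c ≤ x := by
        intro x hx
        rcases List.mem_cons.mp hx with rfl | hx'
        · exact le_refl _
        · exact (List.pairwise_cons.mp hr).1 x hx'
      simp only [pvRuns2, Bool.and_eq_true, beq_iff_eq, bne_iff_ne]
      constructor
      · rintro ⟨⟨heq, hca⟩, hrun⟩
        subst heq
        have hrest := (ih hr).mp hrun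
        have hnotmem : a ∉ c :: rest := by
          intro hm
          have h1 : c ≤ a := hcr a hm
          have h2' : a < c := lt_of_le_of_ne hac (Ne.symm hca)
          omega
        intro x hx
        rcases List.mem_cons.mp hx with rfl | hx'
        · simp [List.count_eq_zero_of_not_mem hnotmem]
        · rcases List.mem_cons.mp hx' with rfl | hx''
          · simp [List.count_eq_zero_of_not_mem hnotmem]
          · have hxa : x ≠ a := fun he => (he ▸ hnotmem) hx''
            simp [Ne.symm hxa, hrest x hx'']
      · intro hall
        have heq : a = b := by
          by_contra hne
          have hlt : a < b := lt_of_le_of_ne hab' hne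
          have hnm : a ∉ b :: c :: rest := by
            intro hm
            rcases List.mem_cons.mp hm with rfl | hm'
            · exact hne rfl
            · have := hbr a hm'
              omega
          have := hall a (by simp)
          rw [List.count_cons_self, List.count_eq_zero_of_not_mem hnm] at this
          omega
        subst heq
        have hca := hall a (by simp)
        rw [List.count_cons, List.count_cons] at hca
        simp at hca
        have hnotmem : a ∉ c :: rest := List.count_eq_zero.mp (by omega)
        have hcna : c ≠ a := by
          intro he
          exact hnotmem (by simp [he])
        have hrest : ∀ x ∈ c :: rest, (c :: rest).count x = 2 := by
          intro x hx
          have hxa : x ≠ a := fun he => (he ▸ hnotmem) hx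
          have := hall x (List.mem_cons.mpr (Or.inr (List.mem_cons.mpr (Or.inr hx))))
          rw [List.count_cons, List.count_cons] at this
          simpa [Ne.symm hxa] using this
        exact ⟨⟨rfl, hcna⟩, (ih hr).mpr hrest⟩

-- all-degrees-two forces #distinct endpoints = #pairs
theorem dedup_length_of_all_two (pair_labels : List (Int × Int))
    (hall : ∀ x ∈ (pair_labels.flatMap (fun p => [p.1, p.2])),
      (pair_labels.flatMap (fun p => [p.1, p.2])).count x = 2) :
    (pair_labels.flatMap (fun p => [p.1, p.2])).dedup.length = pair_labels.length := by
  set flat := pair_labels.flatMap (fun p => [p.1, p.2]) with hflat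
  have hsum : (flat.dedup.map fun x => flat.count x).sum = flat.length :=
    List.sum_map_count_dedup_eq_length flat
  have h2 : (flat.dedup.map fun x => flat.count x).sum = (flat.dedup.map fun x => flat.count x).length * 2 := by
    rw [List.sum_eq_card_nsmul _ 2]
    · simp [smul_eq_mul, Nat.mul_comm]
    · intro x hx
      rcases List.mem_map.mp hx with ⟨y, hy, hxy⟩
      exact hxy ▸ hall y (List.mem_dedup.mp hy)
  have hlen := length_flat pair_labels
  rw [← hflat] at hlen
  simp only [List.length_map] at h2
  omega

theorem main_eq (pair_labels : List (Int × Int)) :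
    pair_labels_form_cycle_py pair_labels = pair_labels_form_cycle_py_alt pair_labels := by
  unfold pair_labels_form_cycle_py pair_labels_form_cycle_py_alt
  by_cases hlen : pair_labels.length < 3
  · simp [hlen]
  · simp only [hlen, if_false]
    set flat := pair_labels.flatMap (fun p => [p.1, p.2]) with hflat
    rw [foldA_eq_counter]
    set L := PySem.List.sorted flat (fun x => x) false with hL
    have hperm : L.Perm flat := PySem.List.sorted_perm flat _ false
    have hsort : L.Pairwise (· ≤ ·) := by
      have := PySem.List.sorted_pairwise (xs := flat) (key := fun x => x)
      simpa using this
    have hBiff : pvRuns2 L = true ↔ ∀ x ∈ flat, flat.count x = 2 := by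
      rw [runs2_iff L hsort]
      constructor
      · intro hh x hx
        rw [← hperm.count_eq]
        exact hh x (hperm.mem_iff.mpr hx)
      · intro hh x hx
        rw [hperm.count_eq]
        exact hh x (hperm.mem_iff.mp hx)
    -- A side: keys/values of the counter
    have hkeys : (PySem.Dict.counter flat).keys = PySem.Set.ofList flat := PySem.Dict.keys_counter flat
    have hvals : (PySem.Dict.counter flat).values
        = (PySem.Set.ofList flat).map (fun k => (flat.count k : Int)) := by
      show ((PySem.Dict.counter flat).items).map Prod.snd = _
      rw [PySem.Dict.items_counter]
      simp
    have hofl : (PySem.Set.ofList flat).Perm flat.dedup := by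
      apply (List.perm_ext_iff_of_nodup (PySem.Set.nodup_ofList flat) flat.nodup_dedup).mpr
      intro x
      rw [PySem.Set.mem_ofList, List.mem_dedup]
    cases hA : (decide ((PySem.Dict.counter flat).keys.length = pair_labels.length)
        && (PySem.Dict.counter flat).values.all (fun v => decide (v = 2))) with
    | true =>
        rw [Bool.and_eq_true, decide_eq_true_iff, List.all_eq_true] at hA
        obtain ⟨_, h2⟩ := hA
        symm
        rw [hBiff]
        intro x hx
        have hx' : ((flat.count x : Int)) ∈ (PySem.Dict.counter flat).values := by
          rw [hvals]
          exact List.mem_map.mpr ⟨x, (PySem.Set.mem_ofList flat x).mpr hx, rfl⟩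
        have := h2 _ hx'
        rw [decide_eq_true_iff] at this
        exact_mod_cast this
    | false =>
        symm
        rw [Bool.eq_false_iff]
        intro hB
        have hall := hBiff.mp hB
        rw [Bool.and_eq_false_iff] at hA
        rcases hA with hA | hA
        · rw [decide_eq_false_iff_not] at hA
          apply hA
          rw [hkeys, hofl.length_eq]
          exact dedup_length_of_all_two pair_labels hall
        · rw [List.all_eq_false] at hA
          rcases hA with ⟨v, hv, hv2⟩
          rw [hvals] at hv
          rcases List.mem_map.mp hv with ⟨y, hy, hyv⟩
          simp only [decide_eq_true_iff] at hv2
          apply hv2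
          rw [← hyv]
          exact_mod_cast hall y ((PySem.Set.mem_ofList flat y).mp hy)

-- ===== VERDICT (by name: the statement is the Claim_ definition above) =====
theorem pair_labels_form_cycle_py_spec : Claim_equal_pair_labels_form_cycle_py := by
  intro pair_labels _
  unfold Spec_pair_labels_form_cycle_py
  exact main_eq pair_labels
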